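-- pv_equiv track=rewrite | github.com/rmclarke/SeriesOfHessianVectorProducts | util.py | pytorch_resnet18_to_haiku_key
-- ===== SOURCE A (Python) =====
-- def pytorch_resnet18_to_haiku_key(pytorch_key, prefix='res_net18/~/'):
--     """Translate `key` from the PyTorch ResNet-18 model into Haiku notation."""
--     haiku_key = prefix
--     split_pytorch_key = pytorch_key.split('.')
--
--     if split_pytorch_key[0].startswith('conv'):
--         if haiku_key == 'res_net18/~/':
--             return haiku_key + 'initial_conv.w'
--         else:
--             haiku_index = int(split_pytorch_key[0][-1]) - 1
--             return haiku_key + f'conv_{haiku_index}.w'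
--     elif split_pytorch_key[0] == 'fc':
--         haiku_key += 'logits.'
--         if split_pytorch_key[1] == 'weight':
--             haiku_key += 'w'
--         elif split_pytorch_key[1] == 'bias':
--             haiku_key += 'b'
--         return haiku_key
--     elif split_pytorch_key[0].startswith('layer'):
--         group_num = int(split_pytorch_key[0][5:]) - 1
--         block_num = int(split_pytorch_key[1])
--         haiku_key += f'block_group_{group_num}/~/block_{block_num}/~/'
--         return pytorch_resnet18_to_haiku_key('.'.join(split_pytorch_key[2:]),
--                                              prefix=haiku_key)
--
--     if split_pytorch_key[0].startswith('bn'):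
--         if haiku_key == 'res_net18/~/':
--             haiku_key += 'initial_batchnorm'
--         else:
--             haiku_index = int(split_pytorch_key[0][-1]) - 1
--             haiku_key += f'batchnorm_{haiku_index}'
--     elif split_pytorch_key[0] == 'downsample':
--         haiku_key += 'shortcut_'
--         if split_pytorch_key[1] == '0':
--             return haiku_key + 'conv.w'
--         else:
--             haiku_key += 'batchnorm'
--
--     if split_pytorch_key[-1] == 'running_mean':
--         haiku_key += '/~/mean_ema.average'
--     elif split_pytorch_key[-1] == 'running_var':
--         haiku_key += '/~/var_ema.average'
--     elif split_pytorch_key[-1] == 'weight':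
--         haiku_key += '.scale'
--     elif split_pytorch_key[-1] == 'bias':
--         haiku_key += '.offset'
--
--     return haiku_key
-- ===== SOURCE B (Python) =====
-- def pytorch_resnet18_to_haiku_key(pytorch_key, prefix='res_net18/~/'):
--     """Translate `key` from the PyTorch ResNet-18 model into Haiku notation."""
--     parts = pytorch_key.split('.')
--     key = prefix
--     while parts and parts[0].startswith('layer'):
--         key += f'block_group_{int(parts[0][5:]) - 1}/~/block_{int(parts[1])}/~/'
--         parts = parts[2:]
--     if not parts:
--         return key
--     head = parts[0]
--     initial = key == 'res_net18/~/'
--     if head.startswith('conv'):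
--         return key + ('initial_conv.w' if initial else f'conv_{int(head[-1]) - 1}.w')
--     if head == 'fc':
--         return key + 'logits.' + {'weight': 'w', 'bias': 'b'}.get(parts[1], '')
--     if head.startswith('bn'):
--         key += 'initial_batchnorm' if initial else f'batchnorm_{int(head[-1]) - 1}'
--     elif head == 'downsample':
--         if parts[1] == '0':
--             return key + 'shortcut_conv.w'
--         key += 'shortcut_batchnorm'
--     return key + {'running_mean': '/~/mean_ema.average',
--                   'running_var': '/~/var_ema.average',
--                   'weight': '.scale',
--                   'bias': '.offset'}.get(parts[-1], '')
-- ===== Notes on version B (the rewrite author's own statement) =====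
-- stated objective: idiomatic
-- what changed: Replaces A's tail recursion (which re-joins the remaining segments into a string and re-splits it at every 'layerG.B' level) by a single split followed by an iterative while-loop that strips layer-prefix pairs from the segment list, and replaces the suffix if/elif chains by dict lookups.
import Mathlib
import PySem

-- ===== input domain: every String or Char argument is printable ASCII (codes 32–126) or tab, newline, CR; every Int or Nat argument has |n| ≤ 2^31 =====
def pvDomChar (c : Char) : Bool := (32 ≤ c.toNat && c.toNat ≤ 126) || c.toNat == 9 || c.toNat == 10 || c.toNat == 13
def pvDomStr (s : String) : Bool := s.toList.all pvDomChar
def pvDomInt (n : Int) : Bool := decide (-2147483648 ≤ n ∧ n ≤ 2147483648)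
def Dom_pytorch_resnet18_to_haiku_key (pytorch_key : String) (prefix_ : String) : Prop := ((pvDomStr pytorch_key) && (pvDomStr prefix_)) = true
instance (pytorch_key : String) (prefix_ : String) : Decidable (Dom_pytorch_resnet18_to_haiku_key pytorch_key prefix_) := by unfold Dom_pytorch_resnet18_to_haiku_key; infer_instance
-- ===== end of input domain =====

-- B replaces A's tail recursion over re-joined/re-split key strings by one split and an
-- iterative strip of the 'layerG.B' prefix pairs, with dict lookups for the suffix tables (idiomatic).


-- ===== PORT A =====
-- trailing `if split_pytorch_key[-1] == …` suffix block of A (shared by the three paths that reach it)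
def pvTailA (sp : List String) (haiku_key : String) : String :=
  let last := (PySem.List.pyGet? sp (-1)).getD ""
  if last == "running_mean" then haiku_key ++ "/~/mean_ema.average"
  else if last == "running_var" then haiku_key ++ "/~/var_ema.average"
  else if last == "weight" then haiku_key ++ ".scale"
  else if last == "bias" then haiku_key ++ ".offset"
  else haiku_key

-- A recurses on the re-joined key string; `fuel` only makes the recursion structural
-- (strictly more than the key length always suffices, since each recursive call shortens the key).
-- Where Python raises (int() on a non-digit, a missing split[1]) the port takes a `getD` default;
-- Pre_ excludes exactly those inputs.
def pvAGo (fuel : Nat) (pytorch_key : String) (prefix_ : String) : String :=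
  match fuel with
  | 0 => prefix_
  | fuel + 1 =>
    let haiku_key := prefix_
    let sp := (PySem.Str.split? pytorch_key ".").getD []
    let s0 := (PySem.List.pyGet? sp 0).getD ""
    if PySem.Str.startswith s0 "conv" then
      if haiku_key == "res_net18/~/" then haiku_key ++ "initial_conv.w"
      else
        let haiku_index := ((PySem.Str.pyGet? s0 (-1)).bind (fun ch => PySem.Int.ofChars? [ch])).getD 0 - 1
        haiku_key ++ ("conv_" ++ PySem.Int.toStr haiku_index ++ ".w")
    else if s0 == "fc" then
      let haiku_key := haiku_key ++ "logits."
      let s1 := (PySem.List.pyGet? sp 1).getD ""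
      if s1 == "weight" then haiku_key ++ "w"
      else if s1 == "bias" then haiku_key ++ "b"
      else haiku_key
    else if PySem.Str.startswith s0 "layer" then
      let group_num := (PySem.Int.ofStr? (PySem.Str.slice s0 (some 5) none)).getD 0 - 1
      let block_num := (PySem.Int.ofStr? ((PySem.List.pyGet? sp 1).getD "")).getD 0
      let haiku_key := haiku_key ++ ("block_group_" ++ PySem.Int.toStr group_num ++ "/~/block_" ++ PySem.Int.toStr block_num ++ "/~/")
      pvAGo fuel (PySem.Str.join "." (PySem.List.slice sp (some 2) none)) haiku_key
    else if PySem.Str.startswith s0 "bn" then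
      let haiku_key :=
        if haiku_key == "res_net18/~/" then haiku_key ++ "initial_batchnorm"
        else
          let haiku_index := ((PySem.Str.pyGet? s0 (-1)).bind (fun ch => PySem.Int.ofChars? [ch])).getD 0 - 1
          haiku_key ++ ("batchnorm_" ++ PySem.Int.toStr haiku_index)
      pvTailA sp haiku_key
    else if s0 == "downsample" then
      let haiku_key := haiku_key ++ "shortcut_"
      if (PySem.List.pyGet? sp 1).getD "" == "0" then haiku_key ++ "conv.w"
      else pvTailA sp (haiku_key ++ "batchnorm")
    else pvTailA sp haiku_key

def pytorch_resnet18_to_haiku_key (pytorch_key : String) (prefix_ : String) : String :=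
  pvAGo (pytorch_key.toList.length + 1) pytorch_key prefix_

-- ===== PORT B =====
-- the `while parts and parts[0].startswith('layer')` loop of B: returns (parts, key) after stripping
def pvAltLoop (parts : List String) (key : String) : List String × String :=
  match parts with
  | [] => ([], key)
  | s0 :: rest =>
    if PySem.Str.startswith s0 "layer" then
      let g := (PySem.Int.ofStr? (PySem.Str.slice s0 (some 5) none)).getD 0 - 1
      let b := (PySem.Int.ofStr? ((PySem.List.pyGet? (s0 :: rest) 1).getD "")).getD 0
      pvAltLoop (PySem.List.slice (s0 :: rest) (some 2) none)
        (key ++ ("block_group_" ++ PySem.Int.toStr g ++ "/~/block_" ++ PySem.Int.toStr b ++ "/~/"))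
    else (s0 :: rest, key)
termination_by parts.length
decreasing_by simp [PySem.List.slice_from]

-- `{…}.get(parts[-1], '')` suffix table of B
def pvAltSuffix (parts : List String) (key : String) : String :=
  key ++ PySem.Dict.getD
    (PySem.Dict.ofList [("running_mean", "/~/mean_ema.average"), ("running_var", "/~/var_ema.average"),
                        ("weight", ".scale"), ("bias", ".offset")])
    ((PySem.List.pyGet? parts (-1)).getD "") ""

def pytorch_resnet18_to_haiku_key_alt (pytorch_key : String) (prefix_ : String) : String :=
  let st := pvAltLoop ((PySem.Str.split? pytorch_key ".").getD []) prefix_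
  let key := st.2
  match st.1 with
  | [] => key
  | head :: tail =>
    let parts := head :: tail
    let initial := key == "res_net18/~/"
    if PySem.Str.startswith head "conv" then
      key ++ (if initial then "initial_conv.w"
              else "conv_" ++ PySem.Int.toStr (((PySem.Str.pyGet? head (-1)).bind (fun ch => PySem.Int.ofChars? [ch])).getD 0 - 1) ++ ".w")
    else if head == "fc" then
      key ++ "logits." ++ PySem.Dict.getD (PySem.Dict.ofList [("weight", "w"), ("bias", "b")]) ((PySem.List.pyGet? parts 1).getD "") ""
    else if PySem.Str.startswith head "bn" then
      pvAltSuffix parts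
        (key ++ (if initial then "initial_batchnorm"
                 else "batchnorm_" ++ PySem.Int.toStr (((PySem.Str.pyGet? head (-1)).bind (fun ch => PySem.Int.ofChars? [ch])).getD 0 - 1)))
    else if head == "downsample" then
      if (PySem.List.pyGet? parts 1).getD "" == "0" then key ++ "shortcut_conv.w"
      else pvAltSuffix parts (key ++ "shortcut_batchnorm")
    else pvAltSuffix parts key

-- ===== PRECONDITION & SPEC =====
-- Pre_ excludes exactly the inputs on which Python A raises: a missing split[1] after 'fc'/'downsample'/'layer…'
-- (IndexError) or a non-integer where A calls int() (ValueError); it checks parseability of the segments only.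
def pvPreSegs : List String → Bool → Bool
  | [], _ => true
  | s0 :: rest, initial =>
    if PySem.Str.startswith s0 "conv" then
      initial || ((PySem.Str.pyGet? s0 (-1)).bind (fun ch => PySem.Int.ofChars? [ch])).isSome
    else if s0 == "fc" then !rest.isEmpty
    else if PySem.Str.startswith s0 "layer" then
      (PySem.Int.ofStr? (PySem.Str.slice s0 (some 5) none)).isSome
        && (match rest with
            | [] => false
            | s1 :: rest' => (PySem.Int.ofStr? s1).isSome && pvPreSegs rest' false)
    else if PySem.Str.startswith s0 "bn" then
      initial || ((PySem.Str.pyGet? s0 (-1)).bind (fun ch => PySem.Int.ofChars? [ch])).isSome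
    else if s0 == "downsample" then !rest.isEmpty
    else true

def Pre_pytorch_resnet18_to_haiku_key (pytorch_key : String) (prefix_ : String) : Prop :=
  pvPreSegs ((PySem.Str.split? pytorch_key ".").getD []) (prefix_ == "res_net18/~/") = true
instance (pytorch_key : String) (prefix_ : String) : Decidable (Pre_pytorch_resnet18_to_haiku_key pytorch_key prefix_) := by
  unfold Pre_pytorch_resnet18_to_haiku_key; infer_instance

def pvWitness_pytorch_resnet18_to_haiku_key : String × String := ("", "p")

def Spec_pytorch_resnet18_to_haiku_key (pytorch_key : String) (prefix_ : String) (out : String) : Prop := out = pytorch_resnet18_to_haiku_key_alt pytorch_key prefix_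
instance (pytorch_key : String) (prefix_ : String) (out : String) : Decidable (Spec_pytorch_resnet18_to_haiku_key pytorch_key prefix_ out) := by unfold Spec_pytorch_resnet18_to_haiku_key; infer_instance

-- ===== CLAIM (what is proved, stated in full; the proofs are below) =====
def Claim_equal_pytorch_resnet18_to_haiku_key : Prop := ∀ (pytorch_key : String) (prefix_ : String), Dom_pytorch_resnet18_to_haiku_key pytorch_key prefix_ → Pre_pytorch_resnet18_to_haiku_key pytorch_key prefix_ → Spec_pytorch_resnet18_to_haiku_key pytorch_key prefix_ (pytorch_resnet18_to_haiku_key pytorch_key prefix_)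

-- ===== LEMMAS AND PROOFS =====

-- splitOn/join round-trip machinery (PySem.Chars.splitOn for a single-character separator)
theorem pv_go_noSep (c : Char) (l : List Char) (fuel : Nat) (cur : List Char) (acc : List (List Char)) (h : c ∉ l) :
    PySem.Chars.splitOn.go [c] fuel l cur acc = ((cur.reverse ++ l) :: acc).reverse := by
  induction l generalizing fuel cur with
  | nil => cases fuel <;> simp [PySem.Chars.splitOn.go]
  | cons x rest ih =>
    cases fuel with
    | zero => simp [PySem.Chars.splitOn.go]
    | succ f =>
      have hx : ¬ (c = x) := fun he => h (by simp [he])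
      rw [PySem.Chars.splitOn.go]
      rw [if_neg (by simp [List.isPrefixOf]; exact hx)]
      rw [ih f (x :: cur) (fun hm => h (List.mem_cons_of_mem _ hm))]
      simp

theorem pv_go_cut (c : Char) (p : List Char) (fuel : Nat) (rest cur : List Char) (acc : List (List Char))
    (hc : c ∉ p) (hf : p.length < fuel) :
    PySem.Chars.splitOn.go [c] fuel (p ++ c :: rest) cur acc
      = PySem.Chars.splitOn.go [c] (fuel - (p.length + 1)) rest [] ((cur.reverse ++ p) :: acc) := by
  induction p generalizing fuel cur with
  | nil =>
    cases fuel with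
    | zero => omega
    | succ f =>
      rw [List.nil_append, PySem.Chars.splitOn.go]
      rw [if_pos (by simp [List.isPrefixOf])]
      simp
  | cons x p' ih =>
    cases fuel with
    | zero => omega
    | succ f =>
      have hx : ¬ (c = x) := fun he => hc (by simp [he])
      rw [List.cons_append, PySem.Chars.splitOn.go]
      rw [if_neg (by simp [List.isPrefixOf]; exact hx)]
      rw [ih f (x :: cur) (fun hm => hc (List.mem_cons_of_mem _ hm)) (by simpa using Nat.lt_of_succ_lt_succ hf)]
      simp

theorem pv_splitOn_join_go (c : Char) (pieces : List (List Char)) (acc : List (List Char)) (fuel : Nat)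
    (hne : pieces ≠ []) (hfree : ∀ p ∈ pieces, c ∉ p)
    (hf : (PySem.Chars.join [c] pieces).length < fuel) :
    PySem.Chars.splitOn.go [c] fuel (PySem.Chars.join [c] pieces) [] acc = acc.reverse ++ pieces := by
  induction pieces generalizing acc fuel with
  | nil => exact absurd rfl hne
  | cons p t ih =>
    cases t with
    | nil =>
      rw [PySem.Chars.join_singleton] at *
      rw [pv_go_noSep c p fuel [] acc (hfree p (by simp))]
      simp
    | cons q t' =>
      rw [PySem.Chars.join_cons_cons] at *
      have hcp : c ∉ p := hfree p (by simp)
      rw [show p ++ [c] ++ PySem.Chars.join [c] (q :: t') = p ++ c :: PySem.Chars.join [c] (q :: t') by simp]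
      rw [pv_go_cut c p fuel _ [] acc hcp (by simp at hf; omega)]
      rw [ih ((([] : List Char).reverse ++ p) :: acc) _ (by simp) (fun r hr => hfree r (by simp [hr])) (by simp at hf ⊢; omega)]
      simp

theorem pv_splitOn_join (c : Char) (pieces : List (List Char))
    (hne : pieces ≠ []) (hfree : ∀ p ∈ pieces, c ∉ p) :
    PySem.Chars.splitOn (PySem.Chars.join [c] pieces) [c] = pieces := by
  rw [PySem.Chars.splitOn]
  rw [pv_splitOn_join_go c pieces [] _ hne hfree (by omega)]
  simp

theorem pv_join_merge (c : Char) (xs : List (List Char)) (a b : List Char) :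
    PySem.Chars.join [c] (xs ++ [a, b]) = PySem.Chars.join [c] (xs ++ [a ++ c :: b]) := by
  induction xs with
  | nil => simp [PySem.Chars.join_cons_cons, PySem.Chars.join_singleton]
  | cons x xs' ih =>
    cases hx : xs' ++ [a, b] with
    | nil => simp at hx
    | cons y ys =>
      cases hx2 : xs' ++ [a ++ c :: b] with
      | nil => simp at hx2
      | cons z zs =>
        rw [List.cons_append, hx, PySem.Chars.join_cons_cons, ← hx, ih, List.cons_append, hx2,
          PySem.Chars.join_cons_cons, ← hx2]

theorem pv_go_join (c : Char) (fuel : Nat) (l cur : List Char) (acc : List (List Char)) :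
    PySem.Chars.join [c] (PySem.Chars.splitOn.go [c] fuel l cur acc)
      = PySem.Chars.join [c] (acc.reverse ++ [cur.reverse ++ l]) := by
  induction fuel generalizing l cur acc with
  | zero => rw [PySem.Chars.splitOn.go]; simp
  | succ f ih =>
    cases l with
    | nil => simp [PySem.Chars.splitOn.go]
    | cons x rest =>
      rw [PySem.Chars.splitOn.go]
      by_cases hx : c = x
      · rw [if_pos (by simp [List.isPrefixOf, hx])]
        simp only [List.length_cons, List.length_nil]
        rw [show List.drop 1 (x :: rest) = rest from rfl]
        rw [ih]
        rw [show ((cur.reverse :: acc).reverse ++ [[].reverse ++ rest] : List (List Char))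
              = acc.reverse ++ [cur.reverse, rest] by simp]
        rw [pv_join_merge, hx]
      · rw [if_neg (by simp [List.isPrefixOf]; exact hx)]
        rw [ih]
        simp

theorem pv_join_splitOn (c : Char) (l : List Char) :
    PySem.Chars.join [c] (PySem.Chars.splitOn l [c]) = l := by
  rw [PySem.Chars.splitOn, pv_go_join]
  simp [PySem.Chars.join_singleton]

theorem pv_go_sepfree (c : Char) (fuel : Nat) (l cur : List Char) (acc : List (List Char))
    (hl : l.length < fuel) (hacc : ∀ p ∈ acc, c ∉ p) (hcur : c ∉ cur) :
    ∀ p ∈ PySem.Chars.splitOn.go [c] fuel l cur acc, c ∉ p := by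
  induction fuel generalizing l cur acc with
  | zero => omega
  | succ f ih =>
    cases l with
    | nil =>
      simp only [PySem.Chars.splitOn.go]
      intro p hp
      simp at hp
      rcases hp with h | h
      · exact hacc p h
      · subst h; simpa using hcur
    | cons x rest =>
      rw [PySem.Chars.splitOn.go]
      by_cases hx : c = x
      · rw [if_pos (by simp [List.isPrefixOf, hx])]
        exact ih _ _ _ (by simp at hl ⊢; omega)
          (by intro p hp; rcases List.mem_cons.mp hp with h | h
              · subst h; simpa using hcur
              · exact hacc p h)
          (by simp)
      · rw [if_neg (by simp [List.isPrefixOf]; exact hx)]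
        exact ih _ _ _ (by simp at hl ⊢; omega) hacc
          (by intro hm; rcases List.mem_cons.mp hm with h | h
              · exact hx h
              · exact hcur h)

theorem pv_splitOn_sepfree (c : Char) (l : List Char) : ∀ p ∈ PySem.Chars.splitOn l [c], c ∉ p := by
  rw [PySem.Chars.splitOn]
  exact pv_go_sepfree c _ l [] [] (by omega) (by simp) (by simp)

theorem pv_go_ne_nil (c : Char) (fuel : Nat) (l cur : List Char) (acc : List (List Char)) :
    PySem.Chars.splitOn.go [c] fuel l cur acc ≠ [] := by
  induction fuel generalizing l cur acc with
  | zero => rw [PySem.Chars.splitOn.go]; simp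
  | succ f ih =>
    cases l with
    | nil => simp [PySem.Chars.splitOn.go]
    | cons x rest =>
      rw [PySem.Chars.splitOn.go]
      by_cases hx : c = x
      · rw [if_pos (by simp [List.isPrefixOf, hx])]; exact ih _ _ _
      · rw [if_neg (by simp [List.isPrefixOf]; exact hx)]; exact ih _ _ _

theorem pv_splitOn_ne_nil (c : Char) (l : List Char) : PySem.Chars.splitOn l [c] ≠ [] :=
  pv_go_ne_nil c _ l [] []

theorem pv_len_drop2 (c : Char) (p0 : List Char) (t : List (List Char)) (h : p0 ≠ []) :
    (PySem.Chars.join [c] ((p0 :: t).drop 2)).length < (PySem.Chars.join [c] (p0 :: t)).length := by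
  cases t with
  | nil =>
    simp [PySem.Chars.join_singleton, PySem.Chars.join_nil]
    exact List.length_pos_of_ne_nil h
  | cons p1 t' =>
    rw [PySem.Chars.join_cons_cons]
    cases t' with
    | nil =>
      simp [PySem.Chars.join_singleton, PySem.Chars.join_nil]
    | cons p2 t'' =>
      rw [PySem.Chars.join_cons_cons]
      have := List.length_pos_of_ne_nil h
      simp
      omega

-- bridges and small facts
theorem pv_split_eq (key : String) :
    (PySem.Str.split? key ".").getD [] = (PySem.Chars.splitOn key.toList ['.']).map String.ofList := by
  simp [PySem.Str.split?, PySem.Chars.split?]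

theorem pv_prefix_excl (s : String) (p q : List Char) (a b : Char) (hab : a ≠ b)
    (h : (a :: p) <+: s.toList) : ¬ ((b :: q) <+: s.toList) := by
  intro hb
  obtain ⟨t1, ht1⟩ := h
  obtain ⟨t2, ht2⟩ := hb
  rw [← ht2] at ht1
  simp at ht1
  exact hab ht1.1

theorem pv_conv_not_layer (s : String) (h : PySem.Str.startswith s "conv" = true) :
    PySem.Str.startswith s "layer" = false := by
  rw [PySem.Str.startswith_eq] at *
  rw [Bool.eq_false_iff]
  intro hl
  rw [PySem.Chars.startswith_iff] at h hl
  exact pv_prefix_excl s ("onv".toList) ("ayer".toList) 'c' 'l' (by decide) h hl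

theorem pv_layer_ne_nil (s : String) (h : PySem.Str.startswith s "layer" = true) : s.toList ≠ [] := by
  rw [PySem.Str.startswith_eq, PySem.Chars.startswith_iff] at h
  intro hnil
  rw [hnil] at h
  simp at h

theorem pv_get0 (x : String) (xs : List String) : (PySem.List.pyGet? (x :: xs) 0).getD "" = x := by
  simp [PySem.List.pyGet?, PySem.List.pyIdx?]

theorem pv_tail_eq (sp : List String) (key : String) : pvTailA sp key = pvAltSuffix sp key := by
  unfold pvTailA pvAltSuffix
  set last := (PySem.List.pyGet? sp (-1)).getD "" with hlast
  by_cases h1 : last = "running_mean"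
  · simp [h1]; decide
  · by_cases h2 : last = "running_var"
    · simp [h2]; decide
    · by_cases h3 : last = "weight"
      · simp [h3]; decide
      · by_cases h4 : last = "bias"
        · simp [h4]; decide
        · simp [h1, h2, h3, h4]
          have hitems : (PySem.Dict.ofList [("running_mean", "/~/mean_ema.average"), ("running_var", "/~/var_ema.average"),
              ("weight", ".scale"), ("bias", ".offset")] : PySem.Dict String String).items
              = [("running_mean", "/~/mean_ema.average"), ("running_var", "/~/var_ema.average"),
                 ("weight", ".scale"), ("bias", ".offset")] := by decide
          have b1 : (("running_mean" : String) == last) = false := by simp [Ne.symm h1]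
          have b2 : (("running_var" : String) == last) = false := by simp [Ne.symm h2]
          have b3 : (("weight" : String) == last) = false := by simp [Ne.symm h3]
          have b4 : (("bias" : String) == last) = false := by simp [Ne.symm h4]
          simp [PySem.Dict.getD, PySem.Dict.get?, hitems, List.find?, b1, b2, b3, b4]

theorem pv_main (fuel : Nat) : ∀ (key prefix_ : String), key.toList.length < fuel →
    pvAGo fuel key prefix_ = pytorch_resnet18_to_haiku_key_alt key prefix_ := by
  induction fuel with
  | zero => intro key prefix_ h; omega
  | succ f ih =>
    intro key prefix_ hlen
    obtain ⟨p0, t, hpieces⟩ : ∃ p0 t, PySem.Chars.splitOn key.toList ['.'] = p0 :: t := by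
      cases hsp : PySem.Chars.splitOn key.toList ['.'] with
      | nil => exact absurd hsp (pv_splitOn_ne_nil _ _)
      | cons a b => exact ⟨a, b, rfl⟩
    have hsp : (PySem.Str.split? key ".").getD [] = String.ofList p0 :: t.map String.ofList := by
      rw [pv_split_eq, hpieces]; rfl
    have hs0g : (PySem.List.pyGet? (String.ofList p0 :: t.map String.ofList) 0).getD "" = String.ofList p0 := pv_get0 _ _
    by_cases hconv : PySem.Str.startswith (String.ofList p0) "conv" = true
    · have hlay : PySem.Str.startswith (String.ofList p0) "layer" = false := pv_conv_not_layer _ hconv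
      have haltl : pvAltLoop (String.ofList p0 :: t.map String.ofList) prefix_ = (String.ofList p0 :: t.map String.ofList, prefix_) := by
        rw [pvAltLoop, if_neg (by rw [PySem.Str.startswith_eq] at hlay; simpa using hlay)]
      simp only [pvAGo, pytorch_resnet18_to_haiku_key_alt, hsp, haltl, hs0g, hconv]
      simp only [if_true]
      by_cases hinit : (prefix_ == "res_net18/~/") = true
      · simp [hinit]
      · simp [hinit]
    · have hconvC : PySem.Chars.startswith p0 ['c', 'o', 'n', 'v'] = false := by
        rw [PySem.Str.startswith_eq] at hconv; simpa using hconv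
      by_cases hfc : (String.ofList p0 == "fc") = true
      · have hp0 : String.ofList p0 = "fc" := by simpa using hfc
        have hlay : PySem.Str.startswith (String.ofList p0) "layer" = false := by rw [hp0]; decide
        have haltl : pvAltLoop (String.ofList p0 :: t.map String.ofList) prefix_ = (String.ofList p0 :: t.map String.ofList, prefix_) := by
          rw [pvAltLoop, if_neg (by rw [PySem.Str.startswith_eq] at hlay; simpa using hlay)]
        simp only [pvAGo, pytorch_resnet18_to_haiku_key_alt, hsp, haltl, hs0g, hfc]
        set s1 := (PySem.List.pyGet? (String.ofList p0 :: t.map String.ofList) 1).getD "" with hs1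
        by_cases hw : s1 = "weight"
        · simp [hconvC, hw,
            show PySem.Dict.getD (PySem.Dict.ofList [("weight", "w"), ("bias", "b")]) "weight" "" = "w" from by decide]
        · by_cases hb : s1 = "bias"
          · simp [hconvC, hb,
              show PySem.Dict.getD (PySem.Dict.ofList [("weight", "w"), ("bias", "b")]) "bias" "" = "b" from by decide]
          · have bw : (("weight" : String) == s1) = false := by simp [Ne.symm hw]
            have bb : (("bias" : String) == s1) = false := by simp [Ne.symm hb]
            have hd : PySem.Dict.getD (PySem.Dict.ofList [("weight", "w"), ("bias", "b")]) s1 "" = "" := by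
              have hitems : (PySem.Dict.ofList [("weight", "w"), ("bias", "b")] : PySem.Dict String String).items
                  = [("weight", "w"), ("bias", "b")] := by decide
              simp [PySem.Dict.getD, PySem.Dict.get?, hitems, List.find?, bw, bb]
            simp [hconvC, hw, hb, hd]
      · by_cases hlayer : PySem.Str.startswith (String.ofList p0) "layer" = true
        · -- layer branch: A recurses, B loops once more
          have hlayerC : PySem.Chars.startswith p0 ['l', 'a', 'y', 'e', 'r'] = true := by
            rw [PySem.Str.startswith_eq] at hlayer; simpa using hlayer
          have hp0ne : p0 ≠ [] := by
            have := pv_layer_ne_nil _ hlayer; simpa using this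
          have hkey : PySem.Chars.join ['.'] (p0 :: t) = key.toList := by
            rw [← hpieces]; exact pv_join_splitOn '.' key.toList
          have hslice : PySem.List.slice (String.ofList p0 :: t.map String.ofList) (some 2) none
              = (t.drop 1).map String.ofList := by
            rw [PySem.List.slice_from _ (by norm_num)]
            simp
          have hkey' : (PySem.Str.join "." ((t.drop 1).map String.ofList)).toList
              = PySem.Chars.join ['.'] (t.drop 1) := by
            rw [PySem.Str.toList_join]
            simp [List.map_map, Function.comp_def]
          have hlen' : (PySem.Str.join "." ((t.drop 1).map String.ofList)).toList.length < f := by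
            have h2 := pv_len_drop2 '.' p0 t hp0ne
            rw [hkey] at h2
            rw [hkey']
            have hd2 : (p0 :: t).drop 2 = t.drop 1 := rfl
            rw [hd2] at h2
            omega
          -- reduce A one step
          simp only [pvAGo, hsp, hs0g, hlayer]
          rw [if_neg hconv, if_neg hfc]
          simp only [if_true]
          rw [hslice]
          rw [ih _ _ hlen']
          -- reduce B's loop one step
          have haltl2 : pvAltLoop (String.ofList p0 :: t.map String.ofList) prefix_
              = pvAltLoop ((t.drop 1).map String.ofList)
                  (prefix_ ++ ("block_group_" ++ PySem.Int.toStr ((PySem.Int.ofStr? (PySem.Str.slice (String.ofList p0) (some 5) none)).getD 0 - 1)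
                    ++ "/~/block_" ++ PySem.Int.toStr ((PySem.Int.ofStr? ((PySem.List.pyGet? (String.ofList p0 :: t.map String.ofList) 1).getD "")).getD 0) ++ "/~/")) := by
            rw [pvAltLoop, if_pos hlayer, hslice]
          rw [pytorch_resnet18_to_haiku_key_alt, pytorch_resnet18_to_haiku_key_alt, hsp, haltl2]
          cases hdt : t.drop 1 with
          | nil =>
            simp only [List.map_nil]
            have hjoin0 : PySem.Str.join "." ([] : List String) = "" := by decide
            have hsplit0 : (PySem.Str.split? "" ".").getD [] = [""] := by decide
            have ha1 : ∀ k : String, pvAltLoop ([""] : List String) k = ([""], k) := fun k => by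
              rw [pvAltLoop, if_neg (by decide)]
            have ha0 : ∀ k : String, pvAltLoop ([] : List String) k = ([], k) := fun k => by
              rw [pvAltLoop]
            simp only [hjoin0, hsplit0, ha1, ha0]
            simp [pvAltSuffix, PySem.Chars.startswith,
              show (PySem.List.pyGet? ([""] : List String) (-1)).getD "" = "" from by decide,
              show PySem.Dict.getD (PySem.Dict.ofList [("running_mean", "/~/mean_ema.average"), ("running_var", "/~/var_ema.average"), ("weight", ".scale"), ("bias", ".offset")]) "" "" = "" from by decide]
          | cons q t2 =>
            have hfree : ∀ r ∈ t.drop 1, '.' ∉ r := by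
              intro r hr
              have hmem : r ∈ p0 :: t := List.mem_cons_of_mem _ (List.mem_of_mem_drop hr)
              rw [← hpieces] at hmem
              exact pv_splitOn_sepfree '.' key.toList r hmem
            have hsplit' : (PySem.Str.split? (PySem.Str.join "." ((t.drop 1).map String.ofList)) ".").getD []
                = (t.drop 1).map String.ofList := by
              rw [pv_split_eq]
              rw [show (PySem.Str.join "." ((t.drop 1).map String.ofList)).toList = PySem.Chars.join ['.'] (t.drop 1) from hkey']
              rw [pv_splitOn_join '.' (t.drop 1) (by rw [hdt]; simp) hfree]
            rw [hdt] at hsplit'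
            simp only [hsplit']
        · -- bn / downsample / plain suffix branch
          have haltl : pvAltLoop (String.ofList p0 :: t.map String.ofList) prefix_
              = (String.ofList p0 :: t.map String.ofList, prefix_) := by
            rw [pvAltLoop, if_neg hlayer]
          simp only [pvAGo, pytorch_resnet18_to_haiku_key_alt, hsp, haltl, hs0g]
          rw [if_neg hconv, if_neg hfc, if_neg hlayer, if_neg hconv, if_neg hfc]
          by_cases hbn : PySem.Str.startswith (String.ofList p0) "bn" = true
          · rw [if_pos hbn, if_pos hbn, pv_tail_eq]
            by_cases hinit : (prefix_ == "res_net18/~/") = true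
            · simp [hinit]
            · simp [hinit]
          · rw [if_neg hbn, if_neg hbn]
            by_cases hds : (String.ofList p0 == "downsample") = true
            · rw [if_pos hds, if_pos hds]
              by_cases h0 : ((PySem.List.pyGet? (String.ofList p0 :: t.map String.ofList) 1).getD "" == "0") = true
              · rw [if_pos h0, if_pos h0]
                rw [String.append_assoc, show ("shortcut_" ++ "conv.w" : String) = "shortcut_conv.w" from by decide]
              · rw [if_neg h0, if_neg h0, pv_tail_eq]
                rw [String.append_assoc, show ("shortcut_" ++ "batchnorm" : String) = "shortcut_batchnorm" from by decide]
            · rw [if_neg hds, if_neg hds, pv_tail_eq]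

-- ===== VERDICT (by name: the statement is the Claim_ definition above) =====
theorem pytorch_resnet18_to_haiku_key_spec : Claim_equal_pytorch_resnet18_to_haiku_key := by
  intro key prefix_ _ _
  unfold Spec_pytorch_resnet18_to_haiku_key pytorch_resnet18_to_haiku_key
  exact pv_main _ _ _ (Nat.lt_succ_self _)
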